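-- pv_equiv track=rewrite | github.com/tcandzq/LeetCode | DynamicProgramming/StickersToSpellWord.py | findNextStatusByUsingStr
-- ===== SOURCE A (Python) =====
-- def findNextStatusByUsingStr(status, target, sticker):
--     n = len(target)
--     for ch in sticker:
--         for k in range(n):
--             if ((status >> k) & 1) == 0 and target[k] == ch:
--                 status = status + (1 << k)
--                 break
--     return status
-- ===== SOURCE B (Python) =====
-- def findNextStatusByUsingStr(status, target, sticker):
--     # Index each character's target positions once; consume covered positions
--     # permanently (bits are only ever added), so each sticker character costs
--     # amortized O(1) instead of a full O(len(target)) scan.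
--     pos = {}
--     for i, c in enumerate(target):
--         pos.setdefault(c, []).append(i)
--     for ch in sticker:
--         lst = pos.get(ch)
--         if not lst:
--             continue
--         j = 0
--         while j < len(lst) and (status >> lst[j]) & 1:
--             j += 1
--         if j < len(lst):
--             status += 1 << lst[j]
--             j += 1
--         pos[ch] = lst[j:]
--     return status
-- ===== Notes on version B (the rewrite author's own statement) =====
-- stated objective: faster
-- what changed: B builds a char-to-ascending-positions index in one pass over target and then consumes each character's position list front-to-back (covered positions are dropped permanently, since bits are only ever added), instead of A's full rescan of target for every sticker character.
import Mathlib
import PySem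

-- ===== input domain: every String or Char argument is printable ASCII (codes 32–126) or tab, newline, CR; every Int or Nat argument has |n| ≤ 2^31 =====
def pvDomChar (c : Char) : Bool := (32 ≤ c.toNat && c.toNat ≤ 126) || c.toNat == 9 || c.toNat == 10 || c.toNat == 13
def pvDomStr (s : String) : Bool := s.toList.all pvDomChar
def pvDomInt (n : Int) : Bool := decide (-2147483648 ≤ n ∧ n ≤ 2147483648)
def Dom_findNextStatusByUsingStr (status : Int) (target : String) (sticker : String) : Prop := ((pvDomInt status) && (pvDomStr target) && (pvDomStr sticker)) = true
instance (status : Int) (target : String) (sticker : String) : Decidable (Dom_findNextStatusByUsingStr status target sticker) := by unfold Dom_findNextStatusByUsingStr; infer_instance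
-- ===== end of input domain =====

-- B replaces A's rescan of all of target per sticker character by a char→positions
-- index whose lists are consumed as positions become covered (objective: faster).

-- ===== PORT A =====
-- inner 'for k in range(n): if ((status >> k) & 1) == 0 and target[k] == ch: status += 1 << k; break'
-- k from pyRange is ≥ 0, so 'status >> k' is 'status >>> k.toNat' and '1 << k' is '1 <<< k.toNat' (exact);
-- '& 1' on the shifted value is ported as Python 'mod 2' (exact: both extract the low bit);
-- 'target[k]' is always in range (k < n), ported with pyGetD (default never read).
def pvAInner (tchars : List Char) (ch : Char) (st : Int) (ks : List Int) : Int :=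
  match ks with
  | [] => st
  | k :: rest =>
    if PySem.Int.mod (st >>> k.toNat) 2 = 0 ∧ PySem.List.pyGetD tchars k 'a' = ch
    then st + ((1:Int) <<< k.toNat)
    else pvAInner tchars ch st rest

def findNextStatusByUsingStr (status : Int) (target : String) (sticker : String) : Int :=
  let n : Int := PySem.Str.len target
  sticker.toList.foldl (fun st ch => pvAInner target.toList ch st (PySem.List.pyRange 0 n 1)) status

-- ===== PORT B =====
-- 'pos.setdefault(c, []).append(i)' over enumerate(target)
def pvBuild (pairs : List (Int × Char)) : PySem.Dict Char (List Int) :=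
  pairs.foldl (fun d p => d.modify p.2 [] (· ++ [p.1])) PySem.Dict.empty

-- the 'while j < len(lst) and (status >> lst[j]) & 1: j += 1' skip loop followed by
-- 'if j < len(lst): status += 1 << lst[j]; j += 1', returning (status, lst[j:])
def pvBScan (st : Int) (l : List Int) : Int × List Int :=
  match l with
  | [] => (st, [])
  | k :: rest =>
    if PySem.Int.mod (st >>> k.toNat) 2 ≠ 0 then pvBScan st rest
    else (st + ((1:Int) <<< k.toNat), rest)

def pvBStep (acc : Int × PySem.Dict Char (List Int)) (ch : Char) : Int × PySem.Dict Char (List Int) :=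
  let lst := acc.2.getD ch []
  if lst = [] then acc
  else
    let r := pvBScan acc.1 lst
    (r.1, acc.2.insert ch r.2)

def findNextStatusByUsingStr_alt (status : Int) (target : String) (sticker : String) : Int :=
  let pos := pvBuild (PySem.List.enumerate target.toList)
  (sticker.toList.foldl pvBStep (status, pos)).1

-- ===== PRECONDITION & SPEC =====
def Spec_findNextStatusByUsingStr (status : Int) (target : String) (sticker : String) (out : Int) : Prop := out = findNextStatusByUsingStr_alt status target sticker
instance (status : Int) (target : String) (sticker : String) (out : Int) : Decidable (Spec_findNextStatusByUsingStr status target sticker out) := by unfold Spec_findNextStatusByUsingStr; infer_instance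

-- ===== CLAIM (what is proved, stated in full; the proofs are below) =====
def Claim_equal_findNextStatusByUsingStr : Prop := ∀ (status : Int) (target : String) (sticker : String), Dom_findNextStatusByUsingStr status target sticker → Spec_findNextStatusByUsingStr status target sticker (findNextStatusByUsingStr status target sticker)

-- ===== LEMMAS AND PROOFS =====

-- the low bit Python tests: (st >> k) & 1
def pvBit (st : Int) (k : Int) : Int := PySem.Int.mod (st >>> k.toNat) 2

theorem pvBit_eq (st : Int) (k : Int) : pvBit st k = (st / 2 ^ k.toNat) % 2 := by
  rw [pvBit, PySem.Int.mod_eq_emod_of_pos (by norm_num : (0:Int) < 2), Int.shiftRight_eq_div_pow]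
  push_cast
  ring

theorem pvBit_zero_or_one (st : Int) (k : Int) : pvBit st k = 0 ∨ pvBit st k = 1 := by
  rw [pvBit_eq]; omega

-- setting an unset bit makes it 1
theorem pvBitSetSelf (st : Int) (k : Nat) (h : (st / 2 ^ k) % 2 = 0) :
    ((st + 2 ^ k) / 2 ^ k) % 2 = 1 := by
  have hne : (2:Int) ^ k ≠ 0 := by positivity
  have h1 : (st + 2 ^ k) / 2 ^ k = st / 2 ^ k + 1 := by
    have := Int.add_mul_ediv_right st 1 hne
    simpa using this
  rw [h1]; omega

-- setting an unset bit leaves every other bit unchanged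
theorem pvBitSetOther (st : Int) (k p : Nat) (hk : (st / 2 ^ k) % 2 = 0) (hne : p ≠ k) :
    ((st + 2 ^ k) / 2 ^ p) % 2 = (st / 2 ^ p) % 2 := by
  rcases Nat.lt_or_gt_of_ne hne with hlt | hgt
  · -- p < k : the added power is an even multiple of 2^p
    have hpk : (2:Int) ^ k = 2 * 2 ^ (k - p - 1) * 2 ^ p := by
      rw [← pow_succ', ← pow_add]; congr 1; omega
    have hpne : (2:Int) ^ p ≠ 0 := by positivity
    have h1 : (st + 2 ^ k) / 2 ^ p = st / 2 ^ p + 2 * 2 ^ (k - p - 1) := by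
      rw [hpk, Int.add_mul_ediv_right _ _ hpne]
    rw [h1]; omega
  · -- p > k : no carry, since bit k of st is 0
    have hek : (0:Int) < 2 ^ k := by positivity
    have hep : (0:Int) < 2 ^ p := by positivity
    have hekne : (2:Int) ^ k ≠ 0 := ne_of_gt hek
    have hepne : (2:Int) ^ p ≠ 0 := ne_of_gt hep
    have hP : (2:Int) ^ p = 2 * 2 ^ (p - k - 1) * 2 ^ k := by
      rw [← pow_succ', ← pow_add]; congr 1; omega
    set G : Int := 2 ^ (p - k - 1) with hG
    have hG0 : 0 < G := by positivity
    set m : Int := st % 2 ^ p with hm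
    have hm0 : 0 ≤ m := Int.emod_nonneg st hepne
    have hmP : m < 2 ^ p := Int.emod_lt_of_pos st hep
    set q : Int := st / 2 ^ p with hq
    have hst : st = m + q * (2 * G) * 2 ^ k := by
      have h := Int.ediv_add_emod st (2 ^ p)
      rw [← hq, ← hm] at h
      linear_combination (-1 : Int) * h + q * hP
    -- bit k of m is also 0
    have hmk : (m / 2 ^ k) % 2 = 0 := by
      have h1 : st / 2 ^ k = m / 2 ^ k + q * (2 * G) := by
        rw [hst, Int.add_mul_ediv_right _ _ hekne]
      have h2 : q * (2 * G) = 2 * (q * G) := by ring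
      rw [h1, h2] at hk
      generalize m / 2 ^ k = a at hk ⊢
      generalize q * G = b at hk
      omega
    -- hence m avoids the top e-block below 2^p : m + 2^k < 2^p
    have hdiv_lt : m / 2 ^ k < 2 * G := by
      rw [Int.ediv_lt_iff_lt_mul hek]
      linarith [hmP, hP.le, hP.ge]
    have hdiv_le : m / 2 ^ k ≤ 2 * G - 2 := by
      generalize m / 2 ^ k = a at hmk hdiv_lt ⊢
      omega
    have hmod0 : 0 ≤ m % 2 ^ k := Int.emod_nonneg m hekne
    have hmodlt : m % 2 ^ k < 2 ^ k := Int.emod_lt_of_pos m hek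
    have hmdecomp : 2 ^ k * (m / 2 ^ k) + m % 2 ^ k = m := Int.ediv_add_emod m (2 ^ k)
    have hmul : 2 ^ k * (m / 2 ^ k) ≤ 2 ^ k * (2 * G - 2) :=
      mul_le_mul_of_nonneg_left hdiv_le (le_of_lt hek)
    have hexp : (2:Int) ^ k * (2 * G - 2) = 2 ^ p - 2 * 2 ^ k := by rw [hP]; ring
    have hcarry : m + 2 ^ k < 2 ^ p := by linarith [hmdecomp, hmul, hmodlt, hexp, hek]
    -- quotients by 2^p agree
    have hqeq : (st + 2 ^ k) / 2 ^ p = q := by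
      have h1 : st + 2 ^ k = (m + 2 ^ k) + q * 2 ^ p := by
        linear_combination hst - q * hP
      rw [h1, Int.add_mul_ediv_right _ _ hepne,
        Int.ediv_eq_zero_of_lt (by omega) hcarry, zero_add]
    rw [hqeq]

-- bit-level facts in pvBit form
theorem pvBit_mono (st : Int) (k p : Int) (hk0 : 0 ≤ k) (hp0 : 0 ≤ p)
    (hcov : pvBit st p = 1) (hset : pvBit st k = 0) :
    pvBit (st + (1:Int) <<< k.toNat) p = 1 := by
  have hne : p.toNat ≠ k.toNat := by
    intro h
    have : p = k := by omega
    rw [this] at hcov; omega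
  rw [pvBit_eq] at hcov hset ⊢
  rw [Int.shiftLeft_eq, one_mul, pvBitSetOther st k.toNat p.toNat hset hne, hcov]

theorem pvBit_set_self (st : Int) (k : Int) (hset : pvBit st k = 0) :
    pvBit (st + (1:Int) <<< k.toNat) k = 1 := by
  rw [pvBit_eq] at hset ⊢
  rw [Int.shiftLeft_eq, one_mul, pvBitSetSelf st k.toNat hset]

-- skipping an all-covered prefix
theorem pvBScan_skip (st : Int) (pre l : List Int) (h : ∀ p ∈ pre, pvBit st p = 1) :
    pvBScan st (pre ++ l) = pvBScan st l := by
  induction pre with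
  | nil => rfl
  | cons a pre ih =>
    have ha : pvBit st a = 1 := h a (by simp)
    have : PySem.Int.mod (st >>> a.toNat) 2 ≠ 0 := by rw [show PySem.Int.mod (st >>> a.toNat) 2 = pvBit st a from rfl, ha]; omega
    simp only [List.cons_append, pvBScan, if_pos this]
    exact ih (fun p hp => h p (by simp [hp]))

-- what pvBScan does: either everything is covered, or it sets the first uncovered bit
theorem pvBScan_spec (st : Int) (l : List Int) :
    ((∀ p ∈ l, pvBit st p = 1) ∧ pvBScan st l = (st, []))
    ∨ (∃ s k t, l = s ++ k :: t ∧ (∀ p ∈ s, pvBit st p = 1) ∧ pvBit st k = 0 ∧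
        pvBScan st l = (st + (1:Int) <<< k.toNat, t)) := by
  induction l with
  | nil => left; exact ⟨by simp, rfl⟩
  | cons a l ih =>
    by_cases ha : pvBit st a = 0
    · right
      refine ⟨[], a, l, by simp, by simp, ha, ?_⟩
      simp only [pvBScan]
      rw [if_neg (by rw [show PySem.Int.mod (st >>> a.toNat) 2 = pvBit st a from rfl, ha]; omega)]
    · have ha1 : pvBit st a = 1 := by rcases pvBit_zero_or_one st a with h | h <;> omega
      have hstep : pvBScan st (a :: l) = pvBScan st l := by
        simp only [pvBScan]
        rw [if_pos (by rw [show PySem.Int.mod (st >>> a.toNat) 2 = pvBit st a from rfl, ha1]; omega)]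
      rcases ih with ⟨hall, heq⟩ | ⟨s, k, t, hdec, hs, hk, heq⟩
      · left
        refine ⟨?_, by rw [hstep, heq]⟩
        intro p hp
        rcases List.mem_cons.mp hp with h | h
        · rw [h]; exact ha1
        · exact hall p h
      · right
        refine ⟨a :: s, k, t, by simp [hdec], ?_, hk, by rw [hstep, heq]⟩
        intro p hp
        rcases List.mem_cons.mp hp with h | h
        · rw [h]; exact ha1
        · exact hs p h

-- definitional unfoldings (cons cases), stated to keep the original conditions
theorem pvAInner_cons (tchars : List Char) (ch : Char) (st : Int) (k : Int) (ks : List Int) :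
    pvAInner tchars ch st (k :: ks)
      = if PySem.Int.mod (st >>> k.toNat) 2 = 0 ∧ PySem.List.pyGetD tchars k 'a' = ch
        then st + ((1:Int) <<< k.toNat) else pvAInner tchars ch st ks := rfl

theorem pvBScan_cons (st : Int) (k : Int) (ks : List Int) :
    pvBScan st (k :: ks)
      = if PySem.Int.mod (st >>> k.toNat) 2 ≠ 0
        then pvBScan st ks else (st + ((1:Int) <<< k.toNat), ks) := rfl

-- A's inner scan computes pvBScan on the filtered index list
theorem pvAInner_eq (tchars : List Char) (ch : Char) (st : Int) (ks : List Int) :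
    pvAInner tchars ch st ks
      = (pvBScan st (ks.filter (fun k => PySem.List.pyGetD tchars k 'a' == ch))).1 := by
  induction ks with
  | nil => rfl
  | cons k ks ih =>
    rw [pvAInner_cons, List.filter_cons]
    by_cases hc : PySem.List.pyGetD tchars k 'a' = ch
    · rw [if_pos (show (PySem.List.pyGetD tchars k 'a' == ch) = true by simpa using hc)]
      by_cases hb : PySem.Int.mod (st >>> k.toNat) 2 = 0
      · rw [if_pos ⟨hb, hc⟩, pvBScan_cons, if_neg (not_not_intro hb)]
      · rw [if_neg (fun h => hb h.1), pvBScan_cons, if_pos hb, ih]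
    · rw [if_neg (fun h => hc h.2),
        if_neg (show ¬(PySem.List.pyGetD tchars k 'a' == ch) = true by simpa using hc), ih]

-- the ascending list of positions of ch in the target
def pvPosOf (tchars : List Char) (ch : Char) : List Int :=
  (PySem.List.pyRange 0 (tchars.length : Int) 1).filter
    (fun k => PySem.List.pyGetD tchars k 'a' == ch)

theorem pvPosOf_nonneg (tchars : List Char) (ch : Char) :
    ∀ p ∈ pvPosOf tchars ch, 0 ≤ p := by
  intro p hp
  have := List.mem_of_mem_filter hp
  exact ((PySem.List.mem_pyRange_one).mp this).1

-- the built dict holds exactly pvPosOf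
theorem pvBuild_getD (pairs : List (Int × Char)) (d : PySem.Dict Char (List Int)) (c : Char) :
    (pairs.foldl (fun d p => d.modify p.2 [] (· ++ [p.1])) d).getD c []
      = d.getD c [] ++ (pairs.filter (fun p => p.2 == c)).map (·.1) := by
  induction pairs generalizing d with
  | nil => simp
  | cons p pairs ih =>
    simp only [List.foldl_cons, ih, List.filter_cons]
    rw [PySem.Dict.getD_modify]
    by_cases hc : p.2 = c
    · rw [if_pos hc.symm, if_pos (by simpa using hc), hc]
      simp [List.append_assoc]
    · rw [if_neg (fun h => hc h.symm), if_neg (by simpa using hc)]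

theorem pvBuild_pos (tchars : List Char) (c : Char) :
    (pvBuild (PySem.List.enumerate tchars)).getD c [] = pvPosOf tchars c := by
  rw [pvBuild, pvBuild_getD, PySem.Dict.getD_empty, List.nil_append,
    PySem.List.enumerate_eq_map_pyRange tchars 'a', List.filter_map, List.map_map]
  simp [pvPosOf, Function.comp_def]

-- the invariant tying B's dict to A's full rescans
def pvInv (st : Int) (pos : PySem.Dict Char (List Int)) (tchars : List Char) : Prop :=
  ∀ c, ∃ pre, pvPosOf tchars c = pre ++ pos.getD c [] ∧ ∀ p ∈ pre, pvBit st p = 1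

theorem pvStep (tchars : List Char) (st : Int) (pos : PySem.Dict Char (List Int))
    (hinv : pvInv st pos tchars) (ch : Char) :
    (pvBStep (st, pos) ch).1 = pvAInner tchars ch st (PySem.List.pyRange 0 (tchars.length : Int) 1)
    ∧ pvInv (pvBStep (st, pos) ch).1 (pvBStep (st, pos) ch).2 tchars := by
  obtain ⟨pre, hdec, hpre⟩ := hinv ch
  have hA : pvAInner tchars ch st (PySem.List.pyRange 0 (tchars.length : Int) 1)
      = (pvBScan st (pos.getD ch [])).1 := by
    rw [pvAInner_eq, ← pvPosOf, hdec, pvBScan_skip st pre _ hpre]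
  by_cases hnil : pos.getD ch [] = []
  · -- B skips; A scans but finds everything covered
    have hstep : pvBStep (st, pos) ch = (st, pos) := by
      simp [pvBStep, hnil]
    rw [hstep]
    refine ⟨?_, hinv⟩
    rw [hA, hnil]; rfl
  · have hstep : pvBStep (st, pos) ch
        = ((pvBScan st (pos.getD ch [])).1, pos.insert ch (pvBScan st (pos.getD ch [])).2) := by
      simp [pvBStep, hnil]
    rw [hstep]
    refine ⟨hA.symm, ?_⟩
    rcases pvBScan_spec st (pos.getD ch []) with ⟨hall, heq⟩ | ⟨s, k, t, hlst, hs, hk, heq⟩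
    · -- every position of ch is already covered: status unchanged
      rw [heq]
      intro c
      by_cases hc : c = ch
      · subst hc
        refine ⟨pre ++ pos.getD c [], ?_, ?_⟩
        · rw [PySem.Dict.getD_insert, if_pos rfl, hdec, List.append_nil]
        · intro p hp
          rcases List.mem_append.mp hp with h | h
          · exact hpre p h
          · exact hall p h
      · obtain ⟨prc, hdc, hpc⟩ := hinv c
        refine ⟨prc, ?_, hpc⟩
        rw [PySem.Dict.getD_insert, if_neg hc, hdc]
    · -- first uncovered position k of ch gets set
      have hmem : ∀ x, x ∈ pre ++ s ++ [k] → x ∈ pvPosOf tchars ch := by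
        intro x hx
        rw [hdec, hlst]
        simp only [List.mem_append, List.mem_cons] at hx ⊢
        tauto
      have hk0 : 0 ≤ k :=
        pvPosOf_nonneg tchars ch k (hmem k (by simp))
      rw [heq]
      intro c
      by_cases hc : c = ch
      · subst hc
        refine ⟨pre ++ s ++ [k], ?_, ?_⟩
        · rw [PySem.Dict.getD_insert, if_pos rfl, hdec, hlst]
          simp
        · intro p hp
          have hp0 : 0 ≤ p := pvPosOf_nonneg tchars c p (hmem p hp)
          rcases List.mem_append.mp hp with h | h
          · rcases List.mem_append.mp h with h' | h'
            · exact pvBit_mono st k p hk0 hp0 (hpre p h') hk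
            · exact pvBit_mono st k p hk0 hp0 (hs p h') hk
          · rw [List.mem_singleton.mp h]
            exact pvBit_set_self st k hk
      · obtain ⟨prc, hdc, hpc⟩ := hinv c
        refine ⟨prc, ?_, ?_⟩
        · rw [PySem.Dict.getD_insert, if_neg hc, hdc]
        · intro p hp
          have hp0 : 0 ≤ p := by
            apply pvPosOf_nonneg tchars c
            rw [hdc]
            exact List.mem_append.mpr (Or.inl hp)
          exact pvBit_mono st k p hk0 hp0 (hpc p hp) hk

theorem pvFold (tchars : List Char) (scs : List Char) :
    ∀ (st : Int) (pos : PySem.Dict Char (List Int)), pvInv st pos tchars →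
    scs.foldl (fun s ch => pvAInner tchars ch s (PySem.List.pyRange 0 (tchars.length : Int) 1)) st
      = (scs.foldl pvBStep (st, pos)).1 := by
  induction scs with
  | nil => intro st pos _; rfl
  | cons ch scs ih =>
    intro st pos hinv
    obtain ⟨heq, hinv'⟩ := pvStep tchars st pos hinv ch
    simp only [List.foldl_cons]
    rw [← heq, ih (pvBStep (st, pos) ch).1 (pvBStep (st, pos) ch).2 hinv', Prod.mk.eta]

-- ===== VERDICT (by name: the statement is the Claim_ definition above) =====
theorem findNextStatusByUsingStr_spec : Claim_equal_findNextStatusByUsingStr := by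
  intro status target sticker _
  unfold Spec_findNextStatusByUsingStr findNextStatusByUsingStr findNextStatusByUsingStr_alt
  have hinv : pvInv status (pvBuild (PySem.List.enumerate target.toList)) target.toList := by
    intro c
    exact ⟨[], by rw [pvBuild_pos, List.nil_append], by simp⟩
  rw [show PySem.Str.len target = (target.toList.length : Int) by simp [PySem.Str.len_eq]]
  exact pvFold target.toList sticker.toList status _ hinv
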